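-- pv_equiv track=rewrite | github.com/OOXXXX/PythonFile | CW-python/contact.py | find_potential_sires
-- ===== SOURCE A (Python) =====
-- def find_potential_sires(iw, groups):
--     sires = {}
--
--     for vampire, (start, end) in iw.items():
--         sires[vampire] = []
--         for day in range(start + 1, end + 1):
--             pm_time = 2 * day  # PM time is calculated as 2 * day
--
--             if pm_time - 1 < len(groups):
--                 current_groups = groups[pm_time - 1]
--
--                 contacts = [group for group in current_groups if vampire in group]
--
--                 if contacts:
--                     sires[vampire].append((pm_time, contacts))
--                 else:
--                     sires[vampire].append((pm_time, [(None)]))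
--             else:
--                 sires[vampire].append((pm_time, [(None)]))
--
--     return sires
-- ===== SOURCE B (Python) =====
-- def find_potential_sires(iw, groups):
--     n = len(groups)
--     # one pass over groups: per time slot, a vampire -> containing-groups index
--     member = []
--     for gs in groups:
--         m = {}
--         for g in gs:
--             for v in dict.fromkeys(g):
--                 m.setdefault(v, []).append(g)
--         member.append(m)
--
--     def row(v, t):
--         if t < n:
--             return member[t].get(v) or [None]
--         return [None]
--
--     return {v: [(2 * d, row(v, 2 * d - 1)) for d in range(s + 1, e + 1)]
--             for v, (s, e) in iw.items()}
-- ===== Notes on version B (the rewrite author's own statement) =====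
-- stated objective: faster
-- what changed: B builds, in one pass over groups, a per-time-slot dictionary mapping each vampire to the list of groups containing it, so each (vampire, day) query becomes a single dict lookup instead of A's scan of every group at that slot with an inner membership scan.
import Mathlib
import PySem

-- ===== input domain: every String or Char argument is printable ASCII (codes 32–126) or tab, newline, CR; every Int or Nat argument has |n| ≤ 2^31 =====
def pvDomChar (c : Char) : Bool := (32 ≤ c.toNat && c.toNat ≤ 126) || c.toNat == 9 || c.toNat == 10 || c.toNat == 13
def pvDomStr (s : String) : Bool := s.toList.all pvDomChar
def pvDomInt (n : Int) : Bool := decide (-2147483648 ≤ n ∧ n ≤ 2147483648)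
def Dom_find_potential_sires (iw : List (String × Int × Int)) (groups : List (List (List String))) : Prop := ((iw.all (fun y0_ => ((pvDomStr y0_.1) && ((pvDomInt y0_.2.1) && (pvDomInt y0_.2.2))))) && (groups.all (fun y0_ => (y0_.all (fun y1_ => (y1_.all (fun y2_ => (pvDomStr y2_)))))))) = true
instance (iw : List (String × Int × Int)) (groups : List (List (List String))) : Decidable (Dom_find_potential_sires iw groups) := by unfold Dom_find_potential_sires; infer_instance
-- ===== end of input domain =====

-- B replaces A's per-vampire-per-day scan of the whole time slot by a per-slot vampire→groups
-- index built once, then O(1) dict lookups (objective: faster, asymptotically).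
-- `iw` is a Python dict: both ports normalise the association list through PySem.Dict first.

-- ===== PORT A =====
-- the items of the dict `iw` (duplicate keys: last value, first position)
def pvItems (iw : List (String × Int × Int)) : List (String × Int × Int) :=
  (PySem.Dict.ofList iw).items

def find_potential_sires (iw : List (String × Int × Int)) (groups : List (List (List String))) : List (String × List (Int × List (Option (List String)))) :=
  (pvItems iw).foldl (fun sires it =>
    let vampire := it.1
    let ent := (PySem.List.pyRange (it.2.1 + 1) (it.2.2 + 1) 1).foldl (fun acc day =>
      let pm_time := 2 * day
      if pm_time - 1 < (groups.length : Int) then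
        match PySem.List.pyGet? groups (pm_time - 1) with
        | some current_groups =>
          let contacts := current_groups.filter (fun group => group.contains vampire)
          if contacts ≠ [] then acc ++ [(pm_time, contacts.map some)]
          else acc ++ [(pm_time, [none])]
        | none => acc ++ [(pm_time, [none])]   -- IndexError in Python; excluded by Pre_
      else acc ++ [(pm_time, [none])]) []
    sires ++ [(vampire, ent)]) []

-- ===== PORT B =====
-- per time slot: vampire -> list of groups containing it (built once)
def pvSlotIndex (gs : List (List String)) : PySem.Dict String (List (List String)) :=
  gs.foldl (fun m g =>
    (PySem.List.dedup g).foldl (fun m v => m.modify v [] (fun l => l ++ [g])) m)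
    PySem.Dict.empty

def pvRow (member : List (PySem.Dict String (List (List String)))) (n : Int) (v : String) (t : Int) : List (Option (List String)) :=
  if t < n then
    match PySem.List.pyGet? member t with
    | some m =>
      let c := m.getD v []
      if c.isEmpty then [none] else c.map some   -- `member[t].get(v) or [None]`
    | none => [none]   -- IndexError in Python; excluded by Pre_
  else [none]

def find_potential_sires_alt (iw : List (String × Int × Int)) (groups : List (List (List String))) : List (String × List (Int × List (Option (List String)))) :=
  let n : Int := (groups.length : Int)
  let member := groups.map pvSlotIndex
  (pvItems iw).map (fun it =>
    (it.1, (PySem.List.pyRange (it.2.1 + 1) (it.2.2 + 1) 1).map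
      (fun d => (2 * d, pvRow member n it.1 (2 * d - 1)))))

-- ===== PRECONDITION & SPEC =====
-- Pre_ excludes exactly the inputs on which Python A raises IndexError: an interval whose first
-- day reaches a negative PM index below -len(groups). Both A and B raise there.
def Pre_find_potential_sires (iw : List (String × Int × Int)) (groups : List (List (List String))) : Prop :=
  ∀ it ∈ (PySem.Dict.ofList iw).items,
    ¬ (it.2.1 < it.2.2 ∧ 2 * it.2.1 + 1 < -(groups.length : Int))
instance (iw : List (String × Int × Int)) (groups : List (List (List String))) : Decidable (Pre_find_potential_sires iw groups) := by unfold Pre_find_potential_sires; infer_instance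

def pvWitness_find_potential_sires : (List (String × Int × Int)) × List (List (List String)) :=
  ([("a", 0, 2), ("b", -1, 1)], [[["a"], ["b"]], [["a", "b"]], []])

def Spec_find_potential_sires (iw : List (String × Int × Int)) (groups : List (List (List String))) (out : List (String × List (Int × List (Option (List String))))) : Prop := out = find_potential_sires_alt iw groups
instance (iw : List (String × Int × Int)) (groups : List (List (List String))) (out : List (String × List (Int × List (Option (List String))))) : Decidable (Spec_find_potential_sires iw groups out) := by unfold Spec_find_potential_sires; infer_instance

-- ===== CLAIM (what is proved, stated in full; the proofs are below) =====
def Claim_equal_find_potential_sires : Prop := ∀ (iw : List (String × Int × Int)) (groups : List (List (List String))), Dom_find_potential_sires iw groups → Pre_find_potential_sires iw groups → Spec_find_potential_sires iw groups (find_potential_sires iw groups)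

-- ===== LEMMAS AND PROOFS =====

-- a fold that appends one element per iteration is a map (pointwise form, hypotheses only on members)
theorem pv_foldl_append_pointwise {α β : Type} (l : List α) (g : List β → α → List β) (f : α → β)
    (h : ∀ acc x, x ∈ l → g acc x = acc ++ [f x]) :
    ∀ init, l.foldl g init = init ++ l.map f := by
  induction l with
  | nil => intro init; simp
  | cons a l ih =>
    intro init
    simp only [List.foldl_cons, List.map_cons]
    rw [h init a (by simp), ih (fun acc x hx => h acc x (by simp [hx]))]
    simp

-- indexing a mapped list
theorem pv_pyGet?_map {α β : Type} (f : α → β) (xs : List α) (i : Int) :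
    PySem.List.pyGet? (xs.map f) i = (PySem.List.pyGet? xs i).map f := by
  simp [PySem.List.pyGet?, PySem.List.pyIdx?]

-- filtering a Nodup list for equality with one key
theorem pv_filter_beq_of_nodup (l : List String) (v : String) (h : l.Nodup) :
    l.filter (fun w => w == v) = if v ∈ l then [v] else [] := by
  induction l with
  | nil => simp
  | cons a l ih =>
    simp only [List.nodup_cons] at h
    by_cases hav : a = v
    · subst hav
      simp [ih h.2, h.1]
    · simp [Ne.symm hav, hav, ih h.2]

-- the per-slot index looks up exactly A's filter
theorem pv_slotIndex_getD (gs : List (List String)) (v : String) :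
    (pvSlotIndex gs).getD v [] = gs.filter (fun g => g.contains v) := by
  suffices h : ∀ (d : PySem.Dict String (List (List String))),
      (gs.foldl (fun m g =>
        (PySem.List.dedup g).foldl (fun m w => m.modify w [] (fun l => l ++ [g])) m) d).getD v []
      = d.getD v [] ++ gs.filter (fun g => g.contains v) by
    simpa [pvSlotIndex] using h PySem.Dict.empty
  induction gs with
  | nil => intro d; simp
  | cons g gs ih =>
    intro d
    simp only [List.foldl_cons, ih, List.filter_cons]
    have hmap : (PySem.List.dedup g).foldl (fun m w => m.modify w [] (fun l => l ++ [g])) d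
        = ((PySem.List.dedup g).map (fun w => (w, g))).foldl
            (fun m p => m.modify p.1 [] (fun l => l ++ [p.2])) d := by
      rw [List.foldl_map]
    rw [hmap, PySem.Dict.getD_foldl_modify_append]
    have hfil : ((PySem.List.dedup g).map (fun w => (w, g))).filter (fun p => p.1 == v)
        = ((PySem.List.dedup g).filter (fun w => w == v)).map (fun w => (w, g)) := by
      rw [List.filter_map]; rfl
    rw [hfil, pv_filter_beq_of_nodup _ _ (PySem.List.nodup_dedup g)]
    by_cases hv : v ∈ g
    · simp [hv]
    · simp [hv]

-- ===== VERDICT (by name: the statement is the Claim_ definition above) =====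
theorem find_potential_sires_spec : Claim_equal_find_potential_sires := by
  intro iw groups _ hpre
  unfold Spec_find_potential_sires find_potential_sires find_potential_sires_alt
  rw [pv_foldl_append_pointwise _ _
    (fun it => (it.1, (PySem.List.pyRange (it.2.1 + 1) (it.2.2 + 1) 1).map
      (fun d => (2 * d, pvRow (groups.map pvSlotIndex) (groups.length : Int) it.1 (2 * d - 1)))))]
  · simp
  · intro acc it hit
    simp only []
    congr 1
    rw [pv_foldl_append_pointwise _ _
      (fun d => (2 * d, pvRow (groups.map pvSlotIndex) (groups.length : Int) it.1 (2 * d - 1))) ?_ []]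
    · simp
    · intro acc2 day hday
      rw [PySem.List.mem_pyRange_one] at hday
      have hpreit := hpre it hit
      have hlow : -(groups.length : Int) ≤ 2 * day - 1 := by omega
      simp only [pvRow]
      by_cases ht : 2 * day - 1 < (groups.length : Int)
      · have hin : PySem.Raise.InRange groups.length (2 * day - 1) := by
          constructor <;> omega
        obtain ⟨cur, hcur⟩ : ∃ cur, PySem.List.pyGet? groups (2 * day - 1) = some cur := by
          cases h : PySem.List.pyGet? groups (2 * day - 1) with
          | none => exact absurd hin ((PySem.List.pyGet?_eq_none_iff _ _).mp h)
          | some c => exact ⟨c, rfl⟩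
        simp only [ht, if_pos, hcur, pv_pyGet?_map, Option.map_some, pv_slotIndex_getD]
        rcases Classical.em (∃ x ∈ cur, it.1 ∈ x) with hc | hc
        · have hall : ¬ ∀ a ∈ cur, it.1 ∉ a := by push Not; exact hc
          simp [hall]
        · have hall : ∀ a ∈ cur, it.1 ∉ a := by push Not at hc; exact hc
          simp [hc]
      · simp [ht]
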